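-- pv_equiv track=rewrite | github.com/sslab-gatech/SecRepoBench | filter.py | rm_multi_line_comments
-- ===== SOURCE A (Python) =====
-- def rm_multi_line_comments(diff_parsed, src):
--     # get ranges of multi line comments
--     multi_line_comments = []
--
--     in_multi_line_comment = False
--
--     for i, line in enumerate(src):
--         line = line.strip()
--
--         if in_multi_line_comment and line.endswith("*/"):
--             # multi line comment ended -- ends with */
--             end_multline_comment = i + 1
--             multi_line_comments.append((start_multline_comment, end_multline_comment))
--             in_multi_line_comment = False
--
--         elif not in_multi_line_comment and line.startswith("/*") and not line.endswith("*/"):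
--                 # a new multi line comment has started
--                 in_multi_line_comment = True
--                 start_multline_comment = i + 1
--
--     # remove lines in diff_parsed that fall within these ranges
--     rm_lines = []
--     for diff in diff_parsed:
--         for start_multline_comment, end_multline_comment in multi_line_comments:
--             if start_multline_comment <= diff[0] <= end_multline_comment:
--                 rm_lines.append(diff[0])
--
--     diff_filter = [diff for diff in diff_parsed if diff[0] not in rm_lines]
--
--     return diff_filter
-- ===== SOURCE B (Python) =====
-- def rm_multi_line_comments(diff_parsed, src):
--     # One scan over src collects the set of all line numbers covered by
--     # multi-line comments; each diff is then filtered with one set lookup.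
--     covered = set()
--     start = None
--     for i, line in enumerate(src):
--         line = line.strip()
--         if start is not None:
--             if line.endswith("*/"):
--                 covered.update(range(start, i + 2))
--                 start = None
--         elif line.startswith("/*") and not line.endswith("*/"):
--             start = i + 1
--     return [d for d in diff_parsed if d[0] not in covered]
-- ===== Notes on version B (the rewrite author's own statement) =====
-- stated objective: alternative
-- what changed: Instead of collecting comment intervals and scanning every interval per diff to build an rm_lines list that is then linearly re-searched per diff, B expands each closed comment interval into a set of covered line numbers during the single source scan and filters each diff with one set lookup.
import Mathlib
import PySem

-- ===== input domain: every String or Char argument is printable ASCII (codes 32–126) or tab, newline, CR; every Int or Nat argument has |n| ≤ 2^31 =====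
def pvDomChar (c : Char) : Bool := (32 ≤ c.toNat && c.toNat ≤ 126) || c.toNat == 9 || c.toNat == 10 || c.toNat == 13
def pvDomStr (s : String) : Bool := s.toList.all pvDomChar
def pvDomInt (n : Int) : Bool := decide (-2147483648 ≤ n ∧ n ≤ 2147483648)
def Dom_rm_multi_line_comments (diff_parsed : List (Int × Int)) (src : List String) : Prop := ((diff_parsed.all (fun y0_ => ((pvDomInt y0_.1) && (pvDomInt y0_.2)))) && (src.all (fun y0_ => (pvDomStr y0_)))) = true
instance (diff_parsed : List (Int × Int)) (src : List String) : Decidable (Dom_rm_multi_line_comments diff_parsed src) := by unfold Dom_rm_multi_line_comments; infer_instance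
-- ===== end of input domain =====

-- B replaces A's interval list + per-diff interval scan + rm_lines list search by a set of
-- covered line numbers built during the single source scan, each diff filtered by one set lookup.

-- ===== PORT A =====
def rm_multi_line_comments (diff_parsed : List (Int × Int)) (src : List String) : List (Int × Int) :=
  -- state: (multi_line_comments, in_multi_line_comment, start_multline_comment)
  let scan := (PySem.List.enumerate src 0).foldl
    (fun (st : List (Int × Int) × Bool × Int) p =>
      let line := PySem.Str.strip p.2
      if st.2.1 && PySem.Str.endswith line "*/" then
        (st.1 ++ [(st.2.2, p.1 + 1)], false, st.2.2)
      else if (!st.2.1) && PySem.Str.startswith line "/*" && !(PySem.Str.endswith line "*/") then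
        (st.1, true, p.1 + 1)
      else st)
    ([], false, 0)
  let mlc := scan.1
  let rm_lines := diff_parsed.foldl
    (fun acc d => mlc.foldl
      (fun acc2 r => if r.1 ≤ d.1 ∧ d.1 ≤ r.2 then acc2 ++ [d.1] else acc2) acc)
    ([] : List Int)
  diff_parsed.filter (fun d => !(rm_lines.contains d.1))

-- ===== PORT B =====
def rm_multi_line_comments_alt (diff_parsed : List (Int × Int)) (src : List String) : List (Int × Int) :=
  -- state: (covered : set of line numbers, start : Option Int)
  let scan := (PySem.List.enumerate src 0).foldl
    (fun (st : PySem.Set Int × Option Int) p =>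
      let line := PySem.Str.strip p.2
      match st.2 with
      | some s =>
        if PySem.Str.endswith line "*/" then
          (PySem.Set.update st.1 (PySem.List.pyRange s (p.1 + 2) 1), none)
        else st
      | none =>
        if PySem.Str.startswith line "/*" && !(PySem.Str.endswith line "*/") then
          (st.1, some (p.1 + 1))
        else st)
    (PySem.Set.empty, none)
  diff_parsed.filter (fun d => !(PySem.Set.contains scan.1 d.1))

-- ===== PRECONDITION & SPEC =====
def Spec_rm_multi_line_comments (diff_parsed : List (Int × Int)) (src : List String) (out : List (Int × Int)) : Prop := out = rm_multi_line_comments_alt diff_parsed src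
instance (diff_parsed : List (Int × Int)) (src : List String) (out : List (Int × Int)) : Decidable (Spec_rm_multi_line_comments diff_parsed src out) := by unfold Spec_rm_multi_line_comments; infer_instance

-- ===== CLAIM (what is proved, stated in full; the proofs are below) =====
def Claim_equal_rm_multi_line_comments : Prop := ∀ (diff_parsed : List (Int × Int)) (src : List String), Dom_rm_multi_line_comments diff_parsed src → Spec_rm_multi_line_comments diff_parsed src (rm_multi_line_comments diff_parsed src)

-- ===== LEMMAS AND PROOFS =====

-- Relation invariant between A's scan state (intervals, flag, start) and B's (covered set, pending start):
-- B's pending start mirrors A's flag+start, and B's covered set holds exactly the integers inside A's intervals.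
lemma pv_scan_rel (l : List (Int × String))
    (a : List (Int × Int) × Bool × Int) (b : PySem.Set Int × Option Int)
    (h1 : b.2 = if a.2.1 then some a.2.2 else none)
    (h2 : ∀ x : Int, x ∈ b.1 ↔ ∃ r ∈ a.1, r.1 ≤ x ∧ x ≤ r.2) :
    (l.foldl (fun (st : PySem.Set Int × Option Int) p =>
      let line := PySem.Str.strip p.2
      match st.2 with
      | some s =>
        if PySem.Str.endswith line "*/" then
          (PySem.Set.update st.1 (PySem.List.pyRange s (p.1 + 2) 1), none)
        else st
      | none =>
        if PySem.Str.startswith line "/*" && !(PySem.Str.endswith line "*/") then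
          (st.1, some (p.1 + 1))
        else st) b).2
      = (if (l.foldl (fun (st : List (Int × Int) × Bool × Int) p =>
          let line := PySem.Str.strip p.2
          if st.2.1 && PySem.Str.endswith line "*/" then
            (st.1 ++ [(st.2.2, p.1 + 1)], false, st.2.2)
          else if (!st.2.1) && PySem.Str.startswith line "/*" && !(PySem.Str.endswith line "*/") then
            (st.1, true, p.1 + 1)
          else st) a).2.1
         then some (l.foldl (fun (st : List (Int × Int) × Bool × Int) p =>
          let line := PySem.Str.strip p.2
          if st.2.1 && PySem.Str.endswith line "*/" then
            (st.1 ++ [(st.2.2, p.1 + 1)], false, st.2.2)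
          else if (!st.2.1) && PySem.Str.startswith line "/*" && !(PySem.Str.endswith line "*/") then
            (st.1, true, p.1 + 1)
          else st) a).2.2 else none)
    ∧ ∀ x : Int, x ∈ (l.foldl (fun (st : PySem.Set Int × Option Int) p =>
      let line := PySem.Str.strip p.2
      match st.2 with
      | some s =>
        if PySem.Str.endswith line "*/" then
          (PySem.Set.update st.1 (PySem.List.pyRange s (p.1 + 2) 1), none)
        else st
      | none =>
        if PySem.Str.startswith line "/*" && !(PySem.Str.endswith line "*/") then
          (st.1, some (p.1 + 1))
        else st) b).1
      ↔ ∃ r ∈ (l.foldl (fun (st : List (Int × Int) × Bool × Int) p =>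
          let line := PySem.Str.strip p.2
          if st.2.1 && PySem.Str.endswith line "*/" then
            (st.1 ++ [(st.2.2, p.1 + 1)], false, st.2.2)
          else if (!st.2.1) && PySem.Str.startswith line "/*" && !(PySem.Str.endswith line "*/") then
            (st.1, true, p.1 + 1)
          else st) a).1, r.1 ≤ x ∧ x ≤ r.2 := by
  induction l generalizing a b with
  | nil => exact ⟨h1, h2⟩
  | cons p l ih =>
    obtain ⟨cov, sB⟩ := b
    obtain ⟨mlc, inml, sA⟩ := a
    simp only [List.foldl_cons]
    cases inml with
    | true =>
      rw [if_pos rfl] at h1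
      simp only at h1
      subst h1
      by_cases he : PySem.Str.endswith (PySem.Str.strip p.2) "*/" = true
      · apply ih
        · simp only [if_pos he, Bool.true_and, if_neg (Bool.false_ne_true)]
        · intro x
          simp only [if_pos he, Bool.true_and, PySem.Set.mem_update,
            PySem.List.mem_pyRange_one, h2 x, List.mem_append, List.mem_cons,
            List.not_mem_nil, or_false]
          constructor
          · rintro (⟨r, hr, hx⟩ | hx)
            · exact ⟨r, Or.inl hr, hx⟩
            · exact ⟨(sA, p.1 + 1), Or.inr rfl, by omega⟩
          · rintro ⟨r, hr | hr, hx⟩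
            · exact Or.inl ⟨r, hr, hx⟩
            · subst hr; exact Or.inr (by simp at hx ⊢; omega)
      · apply ih
        · simp only [if_neg he, Bool.true_and, Bool.not_true, Bool.false_and,
            if_neg (Bool.false_ne_true)]
          simp
        · intro x
          simp only [if_neg he, Bool.true_and, Bool.not_true, Bool.false_and,
            if_neg (Bool.false_ne_true), h2 x]
    | false =>
      rw [if_neg (by simp)] at h1
      simp only at h1
      subst h1
      by_cases hc : (PySem.Str.startswith (PySem.Str.strip p.2) "/*"
          && !PySem.Str.endswith (PySem.Str.strip p.2) "*/") = true
      · apply ih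
        · simp only [hc, Bool.false_and, Bool.not_false, Bool.true_and,
            if_neg (Bool.false_ne_true)]
          simp
        · intro x
          simp only [hc, Bool.false_and, Bool.not_false, Bool.true_and,
            if_neg (Bool.false_ne_true)]
          simp [h2 x]
      · apply ih
        · simp only [hc, Bool.false_and, Bool.not_false, Bool.true_and,
            if_neg (Bool.false_ne_true)]
        · intro x
          simp only [hc, Bool.false_and, Bool.not_false, Bool.true_and,
            if_neg (Bool.false_ne_true), h2 x]

-- membership in A's inner rm_lines loop over the interval list
lemma pv_mem_inner (mlc : List (Int × Int)) (v : Int) (acc : List Int) (x : Int) :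
    x ∈ mlc.foldl (fun acc2 r => if r.1 ≤ v ∧ v ≤ r.2 then acc2 ++ [v] else acc2) acc
      ↔ x ∈ acc ∨ (x = v ∧ ∃ r ∈ mlc, r.1 ≤ v ∧ v ≤ r.2) := by
  induction mlc generalizing acc with
  | nil => simp
  | cons r mlc ih =>
    simp only [List.foldl_cons]
    by_cases h : r.1 ≤ v ∧ v ≤ r.2
    · simp only [if_pos h, ih, List.mem_append, List.mem_cons, List.not_mem_nil, or_false]
      constructor
      · rintro ((hx | hx) | ⟨hx, r', hr', hv⟩)
        · exact Or.inl hx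
        · exact Or.inr ⟨hx, r, Or.inl rfl, h⟩
        · exact Or.inr ⟨hx, r', Or.inr hr', hv⟩
      · rintro (hx | ⟨hx, r', hr' | hr', hv⟩)
        · exact Or.inl (Or.inl hx)
        · exact Or.inl (Or.inr hx)
        · exact Or.inr ⟨hx, r', hr', hv⟩
    · simp only [if_neg h, ih, List.mem_cons]
      constructor
      · rintro (hx | ⟨hx, r', hr', hv⟩)
        · exact Or.inl hx
        · exact Or.inr ⟨hx, r', Or.inr hr', hv⟩
      · rintro (hx | ⟨hx, r', hr' | hr', hv⟩)
        · exact Or.inl hx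
        · exact absurd (hr' ▸ hv) h
        · exact Or.inr ⟨hx, r', hr', hv⟩

-- membership in A's rm_lines
lemma pv_mem_rm (dp : List (Int × Int)) (mlc : List (Int × Int)) (acc : List Int) (x : Int) :
    x ∈ dp.foldl (fun acc d => mlc.foldl
        (fun acc2 r => if r.1 ≤ d.1 ∧ d.1 ≤ r.2 then acc2 ++ [d.1] else acc2) acc) acc
      ↔ x ∈ acc ∨ ∃ d ∈ dp, x = d.1 ∧ ∃ r ∈ mlc, r.1 ≤ d.1 ∧ d.1 ≤ r.2 := by
  induction dp generalizing acc with
  | nil => simp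
  | cons d dp ih =>
    simp only [List.foldl_cons, ih, pv_mem_inner, List.mem_cons]
    constructor
    · rintro ((hx | hx) | ⟨d', hd', hx⟩)
      · exact Or.inl hx
      · exact Or.inr ⟨d, Or.inl rfl, hx⟩
      · exact Or.inr ⟨d', Or.inr hd', hx⟩
    · rintro (hx | ⟨d', hd' | hd', hx⟩)
      · exact Or.inl (Or.inl hx)
      · exact Or.inl (Or.inr (hd' ▸ hx))
      · exact Or.inr ⟨d', hd', hx⟩

-- ===== VERDICT (by name: the statement is the Claim_ definition above) =====
theorem rm_multi_line_comments_spec : Claim_equal_rm_multi_line_comments := by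
  intro diff_parsed src _
  unfold Spec_rm_multi_line_comments rm_multi_line_comments rm_multi_line_comments_alt
  obtain ⟨-, h2⟩ := pv_scan_rel (PySem.List.enumerate src 0)
    ([], false, 0) (PySem.Set.empty, none) rfl (by simp [PySem.Set.empty])
  apply List.filter_congr
  intro d hd
  congr 1
  rw [Bool.eq_iff_iff, List.contains_iff_mem, PySem.Set.contains_iff, pv_mem_rm, h2]
  constructor
  · rintro (h | ⟨d', _, hx, r, hr, hv⟩)
    · exact absurd h (List.not_mem_nil (a := d.1))
    · exact ⟨r, hr, hx ▸ hv⟩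
  · rintro ⟨r, hr, hv⟩
    exact Or.inr ⟨d, hd, rfl, r, hr, hv⟩
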